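-- pv_equiv track=rewrite | github.com/need-singularity/sylvian-singularity | .shared/calc/elliptic_curves_perfect.py | ap_naive
-- ===== SOURCE A (Python) =====
-- def ap_naive(a_coeff, b_coeff, p):
--     """Compute a_p for y^2 = x^3 + a*x + b over F_p by point counting."""
--     if p < 3:
--         return 0
--     count = 0  # points at infinity: 1
--     for x in range(p):
--         rhs = (x**3 + a_coeff * x + b_coeff) % p
--         # Legendre symbol
--         if rhs == 0:
--             count += 1
--         else:
--             # Euler criterion
--             leg = pow(rhs, (p - 1) // 2, p)
--             if leg == 1:
--                 count += 2
--     # #E(F_p) = 1 + count (point at infinity + affine points)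
--     num_points = 1 + count
--     return p + 1 - num_points
-- ===== SOURCE B (Python) =====
-- def ap_naive(a_coeff, b_coeff, p):
--     """Compute a_p for y^2 = x^3 + a*x + b over F_p by point counting."""
--     if p < 3:
--         return 0
--     # sqrt_count[v] = number of y in [0, p) with y*y == v (mod p)
--     sqrt_count = [0] * p
--     for y in range(p):
--         sqrt_count[(y * y) % p] += 1
--     affine = 0
--     for x in range(p):
--         affine += sqrt_count[(x ** 3 + a_coeff * x + b_coeff) % p]
--     return p - affine
-- ===== Notes on version B (the rewrite author's own statement) =====
-- stated objective: alternative
-- what changed: B drops the per-x Euler-criterion classification entirely: it precomputes a table sqrt_count[v] = #{y : y*y % p == v} in one counting pass over y, then sums table lookups over x and returns p - affine.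
-- outside the precondition, e.g. on ap_naive(1, 1, 6): A returns -2, B returns 0; on ap_naive(1, 1, 9): A returns 4, B returns 0
import Mathlib
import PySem

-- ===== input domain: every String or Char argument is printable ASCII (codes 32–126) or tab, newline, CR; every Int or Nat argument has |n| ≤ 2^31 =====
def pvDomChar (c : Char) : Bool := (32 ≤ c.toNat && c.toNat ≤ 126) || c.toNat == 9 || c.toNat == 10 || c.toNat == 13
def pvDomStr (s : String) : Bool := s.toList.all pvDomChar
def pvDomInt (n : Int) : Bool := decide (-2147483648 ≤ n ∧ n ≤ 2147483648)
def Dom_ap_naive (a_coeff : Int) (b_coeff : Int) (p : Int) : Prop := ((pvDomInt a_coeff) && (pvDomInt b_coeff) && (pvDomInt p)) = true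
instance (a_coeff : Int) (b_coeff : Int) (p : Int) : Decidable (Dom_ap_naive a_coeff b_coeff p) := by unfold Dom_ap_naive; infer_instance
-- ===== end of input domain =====

-- B replaces A's per-x Euler-criterion classification by a precomputed table of
-- square-root counts (one counting pass over y, then one lookup pass over x).

-- ===== PORT A =====
def ap_naive (a_coeff : Int) (b_coeff : Int) (p : Int) : Int :=
  if p < 3 then 0
  else
    let count := (PySem.List.pyRange 0 p 1).foldl (fun count x =>
      let rhs := PySem.Int.mod (x ^ 3 + a_coeff * x + b_coeff) p
      if rhs = 0 then count + 1
      else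
        -- pow(rhs, (p-1)//2, p): the exponent is ≥ 0 here (p ≥ 3), so .toNat is exact
        let leg := PySem.Int.powMod rhs (PySem.Int.floordiv (p - 1) 2).toNat p
        if leg = 1 then count + 2 else count) 0
    let num_points := 1 + count
    p + 1 - num_points

-- ===== PORT B =====
def ap_naive_alt (a_coeff : Int) (b_coeff : Int) (p : Int) : Int :=
  if p < 3 then 0
  else
    -- sqrt_count[(y*y) % p] += 1 : the index is in [0, p) (mod of a positive
    -- modulus), so .toNat and List.set/getD are exact renderings of Python indexing
    let sqrt_count : List Int := (PySem.List.pyRange 0 p 1).foldl (fun t y =>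
      let i := (PySem.Int.mod (y * y) p).toNat
      t.set i (t.getD i 0 + 1)) (List.replicate p.toNat 0)
    let affine := (PySem.List.pyRange 0 p 1).foldl (fun affine x =>
      affine + sqrt_count.getD (PySem.Int.mod (x ^ 3 + a_coeff * x + b_coeff) p).toNat 0) 0
    p - affine

-- ===== PRECONDITION & SPEC =====
-- Pre_ restricts to the function's natural domain: p below the guard (both return 0)
-- or p an actual prime, as the docstring's F_p demands. On composite p ≥ 3, which A
-- still accepts, A's Euler-criterion "Legendre symbol" is meaningless and the value A
-- returns is an artefact that B does not reproduce (e.g. p = 6: A returns -2, B 0).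
def Pre_ap_naive (a_coeff : Int) (b_coeff : Int) (p : Int) : Prop :=
  p < 3 ∨ Nat.Prime p.toNat

instance (a_coeff : Int) (b_coeff : Int) (p : Int) : Decidable (Pre_ap_naive a_coeff b_coeff p) := by
  unfold Pre_ap_naive; infer_instance

def pvWitness_ap_naive : Int × Int × Int := (1, 1, 5)

def Spec_ap_naive (a_coeff : Int) (b_coeff : Int) (p : Int) (out : Int) : Prop := out = ap_naive_alt a_coeff b_coeff p
instance (a_coeff : Int) (b_coeff : Int) (p : Int) (out : Int) : Decidable (Spec_ap_naive a_coeff b_coeff p out) := by unfold Spec_ap_naive; infer_instance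

-- ===== CLAIM (what is proved, stated in full; the proofs are below) =====
def Claim_equal_ap_naive : Prop := ∀ (a_coeff : Int) (b_coeff : Int) (p : Int), Dom_ap_naive a_coeff b_coeff p → Pre_ap_naive a_coeff b_coeff p → Spec_ap_naive a_coeff b_coeff p (ap_naive a_coeff b_coeff p)

-- ===== LEMMAS AND PROOFS =====

-- The count table: after the counting pass, entry j holds its previous value plus the
-- number of list elements whose index g y equals j.
theorem tblGetD (g : Int → Nat) (l : List Int) (t : List Int) (j : Nat)
    (hj : j < t.length) (hg : ∀ y ∈ l, g y < t.length) :
    (l.foldl (fun t y => t.set (g y) (t.getD (g y) 0 + 1)) t).getD j 0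
      = t.getD j 0 + (l.countP (fun y => g y == j) : Int) := by
  induction l generalizing t with
  | nil => simp
  | cons y l ih =>
    simp only [List.foldl_cons, List.countP_cons]
    have hlen : (t.set (g y) (t.getD (g y) 0 + 1)).length = t.length := List.length_set
    rw [ih _ (by omega) (fun z hz => by rw [hlen]; exact hg z (List.mem_cons_of_mem _ hz))]
    by_cases h : g y = j
    · subst h
      rw [List.getD_eq_getElem _ _ (by omega), List.getElem_set_self (by omega),
          List.getD_eq_getElem _ _ hj]
      simp
      ring
    · rw [List.getD_eq_getElem _ _ (by omega), List.getElem_set_ne h (by omega),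
          List.getD_eq_getElem _ _ hj]
      simp [h]

-- Counting y ∈ [0,p) with (y*y) % p = v, moved from pyRange over Int to List.range over Nat.
theorem countRangeNat (n w : ℕ) :
    (PySem.List.pyRange 0 (n : Int) 1).countP
        (fun y => (PySem.Int.mod (y * y) (n : Int)).toNat == w)
      = (List.range n).countP (fun k => (k * k) % n == w) := by
  rw [PySem.List.pyRange_one, List.countP_map]
  rw [show ((n : Int) - 0).toNat = n by omega]
  apply List.countP_congr
  intro k hk
  simp only [Function.comp, zero_add]
  rw [show ((k : Int)) * ((k : Int)) = (((k * k : Nat)) : Int) by push_cast; ring,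
     PySem.Int.mod_natCast]
  rw [Int.toNat_natCast]

-- The Nat count is the number of solutions of z * z = w in ZMod n.
theorem countToZMod (n w : ℕ) [NeZero n] (hw : w < n) :
    (List.range n).countP (fun k => (k * k) % n == w)
      = (Finset.univ.filter (fun z : ZMod n => z * z = (w : ZMod n))).card := by
  have hpred : (fun k => (k * k) % n == w) = (fun k => decide ((k * k) % n = w)) := by
    funext k; exact Bool.beq_eq_decide_eq _ _
  rw [hpred]
  have h1 : (List.range n).countP (fun k => decide ((k * k) % n = w))
      = ((Finset.range n).filter (fun k => (k * k) % n = w)).card := by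
    simp [Finset.filter, Finset.card, Finset.range, Multiset.range, List.countP_eq_length_filter]
  rw [h1]
  apply Finset.card_nbij (i := fun k : ℕ => (k : ZMod n))
  · intro k hk
    simp only [Finset.coe_filter, Finset.mem_range, Set.mem_setOf_eq] at hk
    simp only [Finset.coe_filter, Finset.mem_univ, Set.mem_setOf_eq, true_and]
    have h2 : ((k * k : ℕ) : ZMod n) = ((w : ℕ) : ZMod n) := by
      rw [ZMod.natCast_eq_natCast_iff]
      show k * k % n = w % n
      rw [hk.2, Nat.mod_eq_of_lt hw]
    push_cast at h2
    exact h2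
  · intro k hk k' hk' hkk
    simp only [Finset.coe_filter, Finset.mem_range] at hk hk'
    have := congrArg ZMod.val hkk
    rwa [ZMod.val_natCast_of_lt hk.1, ZMod.val_natCast_of_lt hk'.1] at this
  · intro z hz
    simp only [Finset.coe_filter, Finset.mem_univ, Set.mem_setOf_eq, true_and] at hz
    refine ⟨z.val, ?_, ZMod.natCast_zmod_val z⟩
    simp only [Finset.coe_filter, Finset.mem_range, Set.mem_setOf_eq]
    refine ⟨ZMod.val_lt z, ?_⟩
    have h3 : (z * z).val = w := by rw [hz, ZMod.val_natCast_of_lt hw]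
    rwa [ZMod.val_mul] at h3

-- Solution-counting for z * z = w in the field ZMod n, n an odd prime.
theorem zmodCard (n : ℕ) [Fact (Nat.Prime n)] (hn : 3 ≤ n) (w : ZMod n) :
    (Finset.univ.filter (fun z : ZMod n => z * z = w)).card
      = if w = 0 then 1 else if IsSquare w then 2 else 0 := by
  by_cases h0 : w = 0
  · subst h0
    rw [if_pos rfl]
    rw [show (Finset.univ.filter (fun z : ZMod n => z * z = 0)) = {0} by
      ext z; simp]
    simp
  · rw [if_neg h0]
    by_cases hs : IsSquare w
    · rw [if_pos hs]
      obtain ⟨u, rfl⟩ := hs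
      have hu : u ≠ 0 := by rintro rfl; simp at h0
      have huu : u ≠ -u := by
        intro h
        have h2 : (2 : ZMod n) * u = 0 := by linear_combination h
        have h3 : (2 : ZMod n) ≠ 0 := by
          have hnd : ¬ (n ∣ 2) := fun hd => by
            have := Nat.le_of_dvd (by norm_num) hd; omega
          simpa [ZMod.natCast_eq_zero_iff] using fun hh : ((2:ℕ) : ZMod n) = 0 =>
            hnd ((ZMod.natCast_eq_zero_iff 2 n).mp hh)
        exact hu (by
          rcases mul_eq_zero.mp h2 with h | h
          · exact absurd h h3
          · exact h)
      rw [show (Finset.univ.filter (fun z : ZMod n => z * z = u * u)) = {u, -u} by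
        ext z; simp [mul_self_eq_mul_self_iff]]
      exact Finset.card_pair huu
    · rw [if_neg hs]
      rw [show (Finset.univ.filter (fun z : ZMod n => z * z = w)) = ∅ by
        ext z
        simp only [Finset.mem_filter, Finset.mem_univ, true_and, Finset.notMem_empty, iff_false]
        intro h
        exact hs ⟨z, h.symm⟩]
      simp

-- A's Euler-criterion test at a nonzero residue is exactly IsSquare in ZMod n.
theorem eulerBridge (n w : ℕ) [Fact (Nat.Prime n)] (hn : 3 ≤ n) (hw : w < n) (hw0 : w ≠ 0) :
    (PySem.Int.powMod (w : Int) (PySem.Int.floordiv ((n : Int) - 1) 2).toNat (n : Int) = 1)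
      ↔ IsSquare ((w : ℕ) : ZMod n) := by
  have hprime : Nat.Prime n := Fact.out
  have hodd : n % 2 = 1 := Nat.odd_iff.mp (hprime.odd_of_ne_two (by omega))
  have he : (PySem.Int.floordiv ((n : Int) - 1) 2).toNat = n / 2 := by
    rw [show ((n : Int) - 1) = (((n - 1 : Nat)) : Int) by omega,
        show (2 : Int) = ((2 : Nat) : Int) by norm_num, PySem.Int.floordiv_natCast]
    omega
  have hz : ((w : ℕ) : ZMod n) ≠ 0 := fun hh => by
    have hd := (ZMod.natCast_eq_zero_iff w n).mp hh
    have := Nat.le_of_dvd (by omega) hd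
    omega
  have key : w ^ (n / 2) % n = 1 ↔ ((w : ℕ) : ZMod n) ^ (n / 2) = 1 := by
    rw [show (((w : ℕ) : ZMod n)) ^ (n / 2) = ((w ^ (n / 2) : ℕ) : ZMod n) by push_cast; ring,
        show (1 : ZMod n) = ((1 : ℕ) : ZMod n) by norm_num,
        ZMod.natCast_eq_natCast_iff]
    unfold Nat.ModEq
    rw [Nat.mod_eq_of_lt (show 1 < n by omega)]
  rw [he, PySem.Int.powMod_eq,
      show ((w : Int) ^ (n / 2)) = (((w ^ (n / 2) : Nat)) : Int) by push_cast; ring,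
      PySem.Int.mod_natCast,
      show (1 : Int) = ((1 : ℕ) : Int) by norm_num, Int.natCast_inj,
      ZMod.euler_criterion n hz]
  exact key

-- Number of square roots of v modulo a prime p ≥ 3, as B counts them, equals A's
-- Euler-criterion classification of v.
theorem sqrtCount_eq (p : Int) (hp3 : 3 ≤ p) (hp : Nat.Prime p.toNat)
    (v : Int) (h0 : 0 ≤ v) (hv : v < p) :
    ((PySem.List.pyRange 0 p 1).countP (fun y => (PySem.Int.mod (y * y) p).toNat == v.toNat) : Int)
      = (if v = 0 then 1
         else if PySem.Int.powMod v (PySem.Int.floordiv (p - 1) 2).toNat p = 1 then 2 else 0) := by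
  obtain ⟨n, rfl⟩ : ∃ n : ℕ, p = (n : Int) := ⟨p.toNat, by omega⟩
  obtain ⟨w, rfl⟩ : ∃ w : ℕ, v = (w : Int) := ⟨v.toNat, by omega⟩
  rw [Int.toNat_natCast] at hp
  haveI : Fact (Nat.Prime n) := ⟨hp⟩
  haveI : NeZero n := ⟨by omega⟩
  have hn3 : 3 ≤ n := by omega
  have hwn : w < n := by omega
  rw [Int.toNat_natCast, countRangeNat, countToZMod n w hwn, zmodCard n hn3]
  by_cases hw0 : w = 0
  · subst hw0
    simp
  · have hz : ((w : ℕ) : ZMod n) ≠ 0 := fun hh => by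
      have hd := (ZMod.natCast_eq_zero_iff w n).mp hh
      have := Nat.le_of_dvd (by omega) hd
      omega
    have hvz : ((w : ℕ) : Int) ≠ 0 := by exact_mod_cast hw0
    rw [if_neg hz, if_neg hvz]
    by_cases hsq : IsSquare ((w : ℕ) : ZMod n)
    · rw [if_pos hsq, if_pos ((eulerBridge n w hn3 hwn hw0).mpr hsq)]
      norm_num
    · rw [if_neg hsq, if_neg (fun hh => hsq ((eulerBridge n w hn3 hwn hw0).mp hh))]
      norm_num

-- ===== VERDICT (by name: the statement is the Claim_ definition above) =====
theorem ap_naive_spec : Claim_equal_ap_naive := by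
  intro a b p _ hpre
  unfold Spec_ap_naive
  by_cases hp3 : p < 3
  · simp [ap_naive, ap_naive_alt, hp3]
  · have hp3' : 3 ≤ p := by omega
    have hp : Nat.Prime p.toNat := hpre.resolve_left hp3
    simp only [ap_naive, ap_naive_alt, if_neg hp3]
    have hmodlt : ∀ x : Int, PySem.Int.mod (x ^ 3 + a * x + b) p < p :=
      fun x => PySem.Int.mod_lt _ (by omega)
    have hmodnn : ∀ x : Int, 0 ≤ PySem.Int.mod (x ^ 3 + a * x + b) p :=
      fun x => PySem.Int.mod_nonneg _ (by omega)
    -- A's loop as a sum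
    have hA : ∀ init : Int, (PySem.List.pyRange 0 p 1).foldl (fun count x =>
        let rhs := PySem.Int.mod (x ^ 3 + a * x + b) p
        if rhs = 0 then count + 1
        else
          let leg := PySem.Int.powMod rhs (PySem.Int.floordiv (p - 1) 2).toNat p
          if leg = 1 then count + 2 else count) init
        = init + ((PySem.List.pyRange 0 p 1).map (fun x =>
            let rhs := PySem.Int.mod (x ^ 3 + a * x + b) p
            if rhs = 0 then 1
            else if PySem.Int.powMod rhs (PySem.Int.floordiv (p - 1) 2).toNat p = 1 then 2
            else 0)).sum := by
      intro init
      rw [show (fun (count : Int) (x : Int) =>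
          let rhs := PySem.Int.mod (x ^ 3 + a * x + b) p
          if rhs = 0 then count + 1
          else
            let leg := PySem.Int.powMod rhs (PySem.Int.floordiv (p - 1) 2).toNat p
            if leg = 1 then count + 2 else count)
        = (fun (count : Int) (x : Int) => count + (
            let rhs := PySem.Int.mod (x ^ 3 + a * x + b) p
            if rhs = 0 then 1
            else if PySem.Int.powMod rhs (PySem.Int.floordiv (p - 1) 2).toNat p = 1 then 2
            else 0)) by
          funext c x
          simp only []
          split_ifs <;> ring]
      exact PySem.List.foldl_add _ _ _
    -- B's loop as a sum
    have hB : ∀ (tbl : List Int) (init : Int), (PySem.List.pyRange 0 p 1).foldl (fun affine x =>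
        affine + tbl.getD (PySem.Int.mod (x ^ 3 + a * x + b) p).toNat 0) init
        = init + ((PySem.List.pyRange 0 p 1).map (fun x =>
            tbl.getD (PySem.Int.mod (x ^ 3 + a * x + b) p).toNat 0)).sum := by
      intro tbl init
      exact PySem.List.foldl_add _ _ _
    rw [hA, hB]
    have hmaps : ((PySem.List.pyRange 0 p 1).map (fun x =>
        ((PySem.List.pyRange 0 p 1).foldl (fun t y =>
          let i := (PySem.Int.mod (y * y) p).toNat
          t.set i (t.getD i 0 + 1)) (List.replicate p.toNat (0 : Int))).getD
            (PySem.Int.mod (x ^ 3 + a * x + b) p).toNat 0))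
        = ((PySem.List.pyRange 0 p 1).map (fun x =>
            let rhs := PySem.Int.mod (x ^ 3 + a * x + b) p
            if rhs = 0 then 1
            else if PySem.Int.powMod rhs (PySem.Int.floordiv (p - 1) 2).toNat p = 1 then 2
            else 0)) := by
      apply List.map_congr_left
      intro x _
      have hrange : ∀ y : Int, (PySem.Int.mod (y * y) p).toNat < (List.replicate p.toNat (0:Int)).length := by
        intro y
        rw [List.length_replicate]
        have := PySem.Int.mod_lt (y * y) (show (0:Int) < p by omega)
        have := PySem.Int.mod_nonneg (y * y) (show (0:Int) < p by omega)
        omega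
      have hjlt : (PySem.Int.mod (x ^ 3 + a * x + b) p).toNat < (List.replicate p.toNat (0:Int)).length := by
        rw [List.length_replicate]
        have := hmodlt x
        have := hmodnn x
        omega
      show ((PySem.List.pyRange 0 p 1).foldl (fun (t : List Int) (y : Int) =>
            t.set ((PySem.Int.mod (y * y) p).toNat)
              (t.getD ((PySem.Int.mod (y * y) p).toNat) 0 + 1))
            (List.replicate p.toNat 0)).getD
            (PySem.Int.mod (x ^ 3 + a * x + b) p).toNat 0
        = if PySem.Int.mod (x ^ 3 + a * x + b) p = 0 then 1
          else if PySem.Int.powMod (PySem.Int.mod (x ^ 3 + a * x + b) p)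
              (PySem.Int.floordiv (p - 1) 2).toNat p = 1 then 2 else 0
      rw [tblGetD (fun y => (PySem.Int.mod (y * y) p).toNat) _ _ _ hjlt (fun y _ => hrange y)]
      rw [List.getD_replicate _ (by simpa using hjlt)]
      rw [zero_add]
      exact sqrtCount_eq p hp3' hp (PySem.Int.mod (x ^ 3 + a * x + b) p) (hmodnn x) (hmodlt x)
    rw [hmaps]
    ring
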